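-- pv_equiv track=rewrite | github.com/mohammadhssn/Algorithm-writing-course-in-Python | 16_remove_min.py | remove_min
-- ===== SOURCE A (Python) =====
-- def remove_min(stack):
--     storage_stack = []
--     if len(stack) == 0:
--         return stack
--
--     min = stack.pop()  # -5
--     stack.append(min)  # [1, 44, 556, -4, 5, 0, 2, -5]
--
--     for i in range(len(stack)):
--         val = stack.pop()
--         if val < min:
--             min = val
--         storage_stack.append(val)
--
--     for i in range(len(storage_stack)):
--         val = storage_stack.pop()
--         if val != min:
--             stack.append(val)
--
--     return stack, min
-- ===== SOURCE B (Python) =====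
-- def remove_min(stack):
--     if not stack:
--         return stack
--     m = min(stack)
--     stack[:] = [x for x in stack if x != m]
--     return stack, m
-- ===== Notes on version B (the rewrite author's own statement) =====
-- stated objective: simpler
-- what changed: B replaces A's double pop/append pass through an auxiliary storage stack with a direct min() followed by one in-place filtering slice assignment.
-- outside the precondition, e.g. on remove_min([]): A returns (), B returns ()
import Mathlib
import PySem

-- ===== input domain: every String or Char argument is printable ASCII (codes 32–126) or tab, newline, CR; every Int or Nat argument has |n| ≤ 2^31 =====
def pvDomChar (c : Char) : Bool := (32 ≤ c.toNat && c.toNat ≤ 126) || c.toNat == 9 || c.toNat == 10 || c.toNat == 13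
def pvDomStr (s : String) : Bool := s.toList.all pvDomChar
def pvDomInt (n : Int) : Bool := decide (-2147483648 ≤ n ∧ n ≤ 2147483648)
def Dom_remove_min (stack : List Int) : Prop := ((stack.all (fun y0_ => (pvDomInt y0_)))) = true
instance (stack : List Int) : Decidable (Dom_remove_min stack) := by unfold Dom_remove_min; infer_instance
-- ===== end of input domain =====

-- B simplifies A (min() + one in-place filter instead of two auxiliary-stack passes); both
-- mutate the argument list in place in Python — the equivalence proved here is about the return value.

-- ===== PORT A =====
-- first 'for' loop: pop each element off `stack`, track the running minimum, push onto storage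
def removeMinLoop1 : Nat → List Int → List Int → Int → List Int × List Int × Int
  | 0, st, storage, m => (st, storage, m)
  | n+1, st, storage, m =>
    match PySem.List.pop? st (-1) with
    | none => (st, storage, m)          -- IndexError: unreachable, the loop pops exactly len(stack) times
    | some (val, st') => removeMinLoop1 n st' (storage ++ [val]) (if val < m then val else m)

-- second 'for' loop: pop storage back, appending everything ≠ min onto `stack`
def removeMinLoop2 : Nat → List Int → List Int → Int → List Int × List Int
  | 0, st, storage, _ => (st, storage)
  | n+1, st, storage, m =>
    match PySem.List.pop? storage (-1) with
    | none => (st, storage)             -- IndexError: unreachable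
    | some (val, storage') => removeMinLoop2 n (if val ≠ m then st ++ [val] else st) storage' m

def remove_min (stack : List Int) : List Int × Int :=
  if stack.length = 0 then (stack, 0)   -- Python returns the bare list here (not a pair); excluded by Pre_
  else
    match PySem.List.pop? stack (-1) with
    | none => (stack, 0)                -- unreachable: stack nonempty
    | some (m0, rest) =>
      let stack1 := rest ++ [m0]        -- stack.append(min): stack restored
      let r1 := removeMinLoop1 stack1.length stack1 [] m0
      let r2 := removeMinLoop2 r1.2.1.length r1.1 r1.2.1 r1.2.2
      (r2.1, r1.2.2)

-- ===== PORT B =====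
def remove_min_alt (stack : List Int) : List Int × Int :=
  if stack.isEmpty then (stack, 0)      -- Python returns the bare list here; excluded by Pre_
  else
    match PySem.List.min? stack (fun y => y) with
    | none => (stack, 0)                -- unreachable: stack nonempty
    | some m => (stack.filter (fun x => x != m), m)

-- ===== PRECONDITION & SPEC =====
-- Pre_ excludes only the empty list, on which Python A (and B) returns the bare list, not a (list, min) pair.
def Pre_remove_min (stack : List Int) : Prop := stack ≠ []
instance (stack : List Int) : Decidable (Pre_remove_min stack) := by unfold Pre_remove_min; infer_instance
def pvWitness_remove_min : List Int := [1, 44, 556, -4, 5, 0, 2, -5]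

def Spec_remove_min (stack : List Int) (out : List Int × Int) : Prop := out = remove_min_alt stack
instance (stack : List Int) (out : List Int × Int) : Decidable (Spec_remove_min stack out) := by unfold Spec_remove_min; infer_instance

-- ===== CLAIM (what is proved, stated in full; the proofs are below) =====
def Claim_equal_remove_min : Prop := ∀ (stack : List Int), Dom_remove_min stack → Pre_remove_min stack → Spec_remove_min stack (remove_min stack)

-- ===== LEMMAS AND PROOFS =====

theorem loop1_spec (st : List Int) : ∀ (storage : List Int) (m : Int),
    removeMinLoop1 st.length st storage m
      = ([], storage ++ st.reverse, st.foldr (fun v acc => if v < acc then v else acc) m) := by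
  induction st using List.reverseRecOn with
  | nil => intro storage m; simp [removeMinLoop1]
  | append_singleton l a ih =>
      intro storage m
      have hlen : (l ++ [a]).length = l.length + 1 := by simp
      rw [hlen]
      simp only [removeMinLoop1, PySem.List.pop?_last]
      rw [ih]
      simp [List.foldr_append, List.append_assoc]

theorem loop2_spec (storage : List Int) : ∀ (st : List Int) (m : Int),
    removeMinLoop2 storage.length st storage m
      = (st ++ storage.reverse.filter (fun v => v != m), []) := by
  induction storage using List.reverseRecOn with
  | nil => intro st m; simp [removeMinLoop2]
  | append_singleton l a ih =>
      intro st m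
      have hlen : (l ++ [a]).length = l.length + 1 := by simp
      rw [hlen]
      simp only [removeMinLoop2, PySem.List.pop?_last]
      rw [ih]
      by_cases h : a = m
      · simp [h]
      · simp [h, List.append_assoc]

theorem foldr_f_min (l : List Int) (a : Int) :
    l.foldr (fun v acc => if v < acc then v else acc) a = l.foldr min a := by
  induction l with
  | nil => rfl
  | cons x t ih => simp only [List.foldr_cons, ih]; rw [min_def]; split_ifs <;> omega

theorem foldr_min_mem (l : List Int) (a : Int) : l.foldr min a ∈ l ++ [a] := by
  induction l with
  | nil => simp
  | cons x t ih =>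
      simp only [List.foldr_cons, List.cons_append, List.mem_cons]
      rw [min_def]; split_ifs with h
      · left; rfl
      · right; exact ih

theorem foldr_min_le (l : List Int) (a : Int) : ∀ y ∈ l ++ [a], l.foldr min a ≤ y := by
  induction l with
  | nil => simp
  | cons x t ih =>
      intro y hy
      simp only [List.cons_append, List.mem_cons] at hy
      simp only [List.foldr_cons]
      rcases hy with rfl | hy
      · exact min_le_left _ _
      · exact le_trans (min_le_right _ _) (ih y hy)

theorem remove_min_spec : Claim_equal_remove_min := by
  intro stack _ hpre
  unfold Spec_remove_min
  induction stack using List.reverseRecOn with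
  | nil => exact absurd rfl hpre
  | append_singleton l a _ =>
    have hA : remove_min (l ++ [a])
        = ((l ++ [a]).filter (fun v => v != l.foldr min a), l.foldr min a) := by
      unfold remove_min
      rw [if_neg (by simp), PySem.List.pop?_last]
      simp only [loop1_spec, loop2_spec, foldr_f_min, List.foldr_append, List.foldr_cons,
        List.foldr_nil, lt_self_iff_false, if_false, List.nil_append, List.reverse_reverse]
    obtain ⟨m, hm⟩ : ∃ m, PySem.List.min? (l ++ [a]) (fun y => y) = some m := by
      cases h : PySem.List.min? (l ++ [a]) (fun y => y) with
      | none => simp [PySem.List.min?_eq_none_iff] at h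
      | some m => exact ⟨m, rfl⟩
    have hB : remove_min_alt (l ++ [a]) = ((l ++ [a]).filter (fun x => x != m), m) := by
      unfold remove_min_alt
      rw [if_neg (by simp), hm]
    have hmin : m = l.foldr min a := by
      apply le_antisymm
      · exact PySem.List.min?_isMin hm _ (foldr_min_mem l a)
      · exact foldr_min_le l a m (PySem.List.min?_mem hm)
    rw [hA, hB, hmin]
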